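-- pv_equiv track=rewrite | github.com/Neverknight/Nova | capability_analyzer.py | _categorize_intent
-- ===== SOURCE A (Python) =====
-- def _categorize_intent(intent: str) -> str:
--     """Categorize an intent into a capability category."""
--     if any(word in intent.lower() for word in ['task', 'reminder', 'schedule']):
--         return 'task_management'
--     elif any(word in intent.lower() for word in ['system', 'file', 'app', 'launch']):
--         return 'system_control'
--     elif any(word in intent.lower() for word in ['weather', 'time', 'screenshot']):
--         return 'core_functions'
--     else:
--         return 'communication'
-- ===== SOURCE B (Python) =====
-- _KEYWORD_CATEGORY = {
--     'task': 'task_management', 'reminder': 'task_management', 'schedule': 'task_management',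
--     'system': 'system_control', 'file': 'system_control', 'app': 'system_control', 'launch': 'system_control',
--     'weather': 'core_functions', 'time': 'core_functions', 'screenshot': 'core_functions',
-- }
-- _PRIORITY = ['task_management', 'system_control', 'core_functions']
--
--
-- def _categorize_intent(intent: str) -> str:
--     """Categorize an intent into a capability category."""
--     lowered = intent.lower()
--     found = set()
--     for i in range(len(lowered)):
--         for kw, cat in _KEYWORD_CATEGORY.items():
--             if lowered.startswith(kw, i):
--                 found.add(cat)
--     for cat in _PRIORITY:
--         if cat in found:
--             return cat
--     return 'communication'
-- ===== Notes on version B (the rewrite author's own statement) =====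
-- stated objective: alternative
-- what changed: Instead of short-circuiting substring tests per hardcoded branch, B scans every position of the lowered string once, collects into a set every category whose keyword starts there (keyword->category map), and then resolves the winner by a separate priority pass.
import Mathlib
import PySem

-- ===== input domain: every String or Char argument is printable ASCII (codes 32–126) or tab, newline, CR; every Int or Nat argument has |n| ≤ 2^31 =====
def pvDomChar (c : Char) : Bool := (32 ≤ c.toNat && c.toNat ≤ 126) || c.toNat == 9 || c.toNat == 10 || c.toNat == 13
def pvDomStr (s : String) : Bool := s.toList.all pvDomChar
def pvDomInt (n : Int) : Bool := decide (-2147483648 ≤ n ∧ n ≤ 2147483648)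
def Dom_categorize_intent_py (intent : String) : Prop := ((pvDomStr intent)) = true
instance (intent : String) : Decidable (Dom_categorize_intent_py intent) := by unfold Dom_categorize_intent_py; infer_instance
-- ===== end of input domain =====

-- B scans every position of the lowered string once, collecting matched categories into a set via a keyword->category table, then resolves by a priority pass (alternative algorithm; same asymptotic cost).


-- ===== PORT A =====
def categorize_intent_py (intent : String) : String :=
  if ["task", "reminder", "schedule"].any (fun word => PySem.Str.isIn word (PySem.Str.lower intent)) then
    "task_management"
  else if ["system", "file", "app", "launch"].any (fun word => PySem.Str.isIn word (PySem.Str.lower intent)) then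
    "system_control"
  else if ["weather", "time", "screenshot"].any (fun word => PySem.Str.isIn word (PySem.Str.lower intent)) then
    "core_functions"
  else
    "communication"

-- ===== PORT B =====
def pvKeywordCategory : List (String × String) :=
  [ ("task", "task_management"), ("reminder", "task_management"), ("schedule", "task_management"),
    ("system", "system_control"), ("file", "system_control"), ("app", "system_control"), ("launch", "system_control"),
    ("weather", "core_functions"), ("time", "core_functions"), ("screenshot", "core_functions") ]

def pvPriority : List String := ["task_management", "system_control", "core_functions"]

def categorize_intent_py_alt (intent : String) : String :=
  let lowered := (PySem.Str.lower intent).toList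
  -- for i in range(len(lowered)): for kw, cat in _KEYWORD_CATEGORY.items(): if lowered.startswith(kw, i): found.add(cat)
  let found : PySem.Set String :=
    (List.range lowered.length).foldl
      (fun acc i =>
        pvKeywordCategory.foldl
          (fun a p => if PySem.Chars.startswith (lowered.drop i) p.1.toList then PySem.Set.add a p.2 else a)
          acc)
      PySem.Set.empty
  -- for cat in _PRIORITY: if cat in found: return cat
  match pvPriority.find? (fun cat => PySem.Set.contains found cat) with
  | some cat => cat
  | none => "communication"

-- ===== PRECONDITION & SPEC =====
def Spec_categorize_intent_py (intent : String) (out : String) : Prop := out = categorize_intent_py_alt intent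
instance (intent : String) (out : String) : Decidable (Spec_categorize_intent_py intent out) := by unfold Spec_categorize_intent_py; infer_instance

-- ===== CLAIM =====
def Claim_equal_categorize_intent_py : Prop := ∀ (intent : String), Dom_categorize_intent_py intent → Spec_categorize_intent_py intent (categorize_intent_py intent)

-- ===== LEMMAS AND PROOFS =====

-- membership in B's inner fold over the keyword table (generic table, generic test)
theorem mem_table_fold (tbl : List (String × String)) (q : String × String → Bool)
    (acc : PySem.Set String) (c : String) :
    (c ∈ tbl.foldl (fun a p => if q p then PySem.Set.add a p.2 else a) acc)
      ↔ c ∈ acc ∨ ∃ p ∈ tbl, q p = true ∧ p.2 = c := by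
  induction tbl generalizing acc with
  | nil => simp
  | cons p tbl ih =>
    simp only [List.foldl_cons, List.mem_cons]
    by_cases hq : q p = true
    · simp only [if_pos hq, ih, PySem.Set.mem_add]
      constructor
      · rintro ((h | rfl) | ⟨q', hq', h1, h2⟩)
        · exact Or.inl h
        · exact Or.inr ⟨p, Or.inl rfl, hq, rfl⟩
        · exact Or.inr ⟨q', Or.inr hq', h1, h2⟩
      · rintro (h | ⟨q', rfl | hq', h1, h2⟩)
        · exact Or.inl (Or.inl h)
        · exact Or.inl (Or.inr h2.symm)
        · exact Or.inr ⟨q', hq', h1, h2⟩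
    · simp only [if_neg hq, ih]
      constructor
      · rintro (h | ⟨q', hq', h1, h2⟩)
        · exact Or.inl h
        · exact Or.inr ⟨q', Or.inr hq', h1, h2⟩
      · rintro (h | ⟨q', rfl | hq', h1, h2⟩)
        · exact Or.inl h
        · exact absurd h1 hq
        · exact Or.inr ⟨q', hq', h1, h2⟩

-- membership in B's outer fold over the position range
theorem mem_range_fold (s : List Char) (idxs : List Nat) (acc : PySem.Set String) (c : String) :
    (c ∈ idxs.foldl
        (fun acc i =>
          pvKeywordCategory.foldl
            (fun a p => if PySem.Chars.startswith (s.drop i) p.1.toList then PySem.Set.add a p.2 else a)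
            acc)
        acc)
      ↔ c ∈ acc ∨ ∃ i ∈ idxs, ∃ p ∈ pvKeywordCategory,
            PySem.Chars.startswith (s.drop i) p.1.toList = true ∧ p.2 = c := by
  induction idxs generalizing acc with
  | nil => simp
  | cons i idxs ih =>
    simp only [List.foldl_cons, List.mem_cons]
    rw [ih, mem_table_fold]
    constructor
    · rintro ((h | ⟨p, hp, h1, h2⟩) | ⟨j, hj, hp⟩)
      · exact Or.inl h
      · exact Or.inr ⟨i, Or.inl rfl, p, hp, h1, h2⟩
      · exact Or.inr ⟨j, Or.inr hj, hp⟩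
    · rintro (h | ⟨j, (rfl | hj), hp⟩)
      · exact Or.inl (Or.inl h)
      · exact Or.inl (Or.inr hp)
      · exact Or.inr ⟨j, hj, hp⟩

-- a nonempty keyword occurs in s iff it starts at some position i < len(s)
theorem exists_startswith_iff_isIn (kw s : List Char) (h : kw ≠ []) :
    (∃ i ∈ List.range s.length, PySem.Chars.startswith (s.drop i) kw = true)
      ↔ PySem.Chars.isIn kw s = true := by
  rw [← PySem.Chars.exists_prefix_drop_iff_isIn]
  constructor
  · rintro ⟨i, _, hi⟩
    exact ⟨i, (PySem.Chars.startswith_iff _ _).mp hi⟩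
  · rintro ⟨j, hj⟩
    by_cases hjl : j < s.length
    · exact ⟨j, List.mem_range.mpr hjl, (PySem.Chars.startswith_iff _ _).mpr hj⟩
    · exfalso
      have hnil : s.drop j = [] := List.drop_eq_nil_of_le (by omega)
      rw [hnil] at hj
      exact h (List.prefix_nil.mp hj)

-- membership of a category in B's found-set, per category
theorem found_iff (s : List Char) (c : String) :
    (c ∈ (List.range s.length).foldl
        (fun acc i =>
          pvKeywordCategory.foldl
            (fun a p => if PySem.Chars.startswith (s.drop i) p.1.toList then PySem.Set.add a p.2 else a)
            acc)
        PySem.Set.empty)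
      ↔ ∃ p ∈ pvKeywordCategory, PySem.Chars.isIn p.1.toList s = true ∧ p.2 = c := by
  rw [mem_range_fold]
  constructor
  · rintro (h | ⟨i, hi, p, hp, h1, h2⟩)
    · exact absurd h (by simp [PySem.Set.empty])
    · refine ⟨p, hp, ?_, h2⟩
      have hne : p.1.toList ≠ [] := by
        fin_cases hp <;> simp
      exact (exists_startswith_iff_isIn _ _ hne).mp ⟨i, hi, h1⟩
  · rintro ⟨p, hp, h1, h2⟩
    have hne : p.1.toList ≠ [] := by
      fin_cases hp <;> simp
    obtain ⟨i, hi, hs⟩ := (exists_startswith_iff_isIn _ _ hne).mpr h1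
    exact Or.inr ⟨i, hi, p, hp, hs, h2⟩

-- ===== VERDICT =====
theorem categorize_intent_py_spec : Claim_equal_categorize_intent_py := by
  intro intent _
  unfold Spec_categorize_intent_py categorize_intent_py categorize_intent_py_alt
  simp only [List.any_cons, List.any_nil, Bool.or_false, PySem.Str.isIn_eq]
  set s := (PySem.Str.lower intent).toList with hs
  have hf := fun c => found_iff s c
  set found := (List.range s.length).foldl
      (fun acc i =>
        pvKeywordCategory.foldl
          (fun a p => if PySem.Chars.startswith (s.drop i) p.1.toList then PySem.Set.add a p.2 else a)
          acc)
      PySem.Set.empty with hfound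
  have hT := hf "task_management"
  have hS := hf "system_control"
  have hC := hf "core_functions"
  simp only [pvKeywordCategory, List.mem_cons, List.not_mem_nil, or_false,
    or_and_right, exists_or, exists_eq_left] at hT hS hC
  have hTb : PySem.Set.contains found "task_management"
      = (PySem.Chars.isIn "task".toList s || PySem.Chars.isIn "reminder".toList s
          || PySem.Chars.isIn "schedule".toList s) := by
    rw [Bool.eq_iff_iff, PySem.Set.contains_iff, hT]
    simp [or_assoc]
  have hSb : PySem.Set.contains found "system_control"
      = (PySem.Chars.isIn "system".toList s || PySem.Chars.isIn "file".toList s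
          || PySem.Chars.isIn "app".toList s || PySem.Chars.isIn "launch".toList s) := by
    rw [Bool.eq_iff_iff, PySem.Set.contains_iff, hS]
    simp [or_assoc]
  have hCb : PySem.Set.contains found "core_functions"
      = (PySem.Chars.isIn "weather".toList s || PySem.Chars.isIn "time".toList s
          || PySem.Chars.isIn "screenshot".toList s) := by
    rw [Bool.eq_iff_iff, PySem.Set.contains_iff, hC]
    simp [or_assoc]
  simp only [pvPriority, List.find?_cons, List.find?_nil, hTb, hSb, hCb]
  cases PySem.Chars.isIn "task".toList s <;>
    cases PySem.Chars.isIn "reminder".toList s <;>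
    cases PySem.Chars.isIn "schedule".toList s <;>
    cases PySem.Chars.isIn "system".toList s <;>
    cases PySem.Chars.isIn "file".toList s <;>
    cases PySem.Chars.isIn "app".toList s <;>
    cases PySem.Chars.isIn "launch".toList s <;>
    cases PySem.Chars.isIn "weather".toList s <;>
    cases PySem.Chars.isIn "time".toList s <;>
    cases PySem.Chars.isIn "screenshot".toList s <;>
      simp
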